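-- pv_equiv track=rewrite | github.com/pcast31/schur | extension/schur_5/find_partitions.py | from_int
-- ===== SOURCE A (Python) =====
-- def from_int(partition):
--     subsets = [[] for _ in range(5)]
--     word = [None] * 161
--     mins = [[] for _ in range(5)]
--
--     for n in range(1, 161):
--         partition //= 5
--         i = partition % 5
--         subsets[i].append(n)
--         word[n] = i
--         mini = mins[i]
--         if len(mini) < 2:
--             mini.append(n)
--
--     return subsets, word, mins
-- ===== SOURCE B (Python) =====
-- def from_int(partition):
--     digits = [(partition // 5 ** n) % 5 for n in range(1, 161)]
--     subsets = [[n for n, d in enumerate(digits, 1) if d == i] for i in range(5)]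
--     word = [None] + digits
--     mins = [s[:2] for s in subsets]
--     return subsets, word, mins
-- ===== Notes on version B (the rewrite author's own statement) =====
-- stated objective: simpler
-- what changed: A's single stateful pass that mutates subsets, word and mins in place is replaced by a closed-form digit list ((partition // 5**n) % 5), comprehensions that filter each residue class out of it, and mins derived afterwards as s[:2] of each subset.
import Mathlib
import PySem

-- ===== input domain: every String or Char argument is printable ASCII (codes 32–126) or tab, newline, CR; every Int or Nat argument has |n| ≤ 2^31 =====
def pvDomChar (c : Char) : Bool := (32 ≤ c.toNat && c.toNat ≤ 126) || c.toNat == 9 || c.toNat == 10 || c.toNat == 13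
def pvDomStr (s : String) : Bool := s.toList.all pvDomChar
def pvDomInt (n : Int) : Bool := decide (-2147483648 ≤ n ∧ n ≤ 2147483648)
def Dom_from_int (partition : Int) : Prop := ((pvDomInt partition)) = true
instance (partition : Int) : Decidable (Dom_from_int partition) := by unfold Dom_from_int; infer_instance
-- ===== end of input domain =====

-- B decodes the 160 base-5 digits with a closed form and builds each residue class
-- by filtering, instead of A's single stateful pass mutating three arrays (objective: simpler).

-- B decodes the 160 base-5 digits with a closed form and builds each residue class
-- by filtering the digit list, instead of A's single stateful pass mutating three arrays in place.

-- ===== PORT A =====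
-- one iteration of A's loop body; state = (subsets, word, mins, partition)
def stepA (st : List (List Int) × List (Option Int) × List (List Int) × Int) (n : Int) :
    List (List Int) × List (Option Int) × List (List Int) × Int :=
  let p := PySem.Int.floordiv st.2.2.2 5
  let i := PySem.Int.mod p 5
  let subsets := PySem.List.pySetD st.1 i (PySem.List.pyGetD st.1 i [] ++ [n])
  let word := PySem.List.pySetD st.2.1 n (some i)
  let mini := PySem.List.pyGetD st.2.2.1 i []
  let mins := if mini.length < 2 then PySem.List.pySetD st.2.2.1 i (mini ++ [n]) else st.2.2.1
  (subsets, word, mins, p)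

def from_int (partition : Int) : List (List Int) × List (Option Int) × List (List Int) :=
  let st := (PySem.List.pyRange 1 161 1).foldl stepA
    (List.replicate 5 [], List.replicate 161 none, List.replicate 5 [], partition)
  (st.1, st.2.1, st.2.2.1)


-- ===== PORT B =====
def from_int_alt (partition : Int) : List (List Int) × List (Option Int) × List (List Int) :=
  let digits : List Int :=
    (PySem.List.pyRange 1 161 1).map
      (fun n => PySem.Int.mod (PySem.Int.floordiv partition ((5 : Int) ^ n.toNat)) 5)
  let subsets : List (List Int) :=
    (PySem.List.pyRange 0 5 1).map
      (fun i => ((PySem.List.enumerate digits 1).filter (fun p => p.2 == i)).map (·.1))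
  let word : List (Option Int) := none :: digits.map some
  let mins : List (List Int) := subsets.map (fun s => PySem.List.slice s none (some 2))
  (subsets, word, mins)


-- ===== PRECONDITION & SPEC =====
def Spec_from_int (partition : Int) (out : List (List Int) × List (Option Int) × List (List Int)) : Prop := out = from_int_alt partition
instance (partition : Int) (out : List (List Int) × List (Option Int) × List (List Int)) : Decidable (Spec_from_int partition out) := by unfold Spec_from_int; infer_instance

-- ===== CLAIM (what is proved, stated in full; the proofs are below) =====
def Claim_equal_from_int : Prop := ∀ (partition : Int), Dom_from_int partition → Spec_from_int partition (from_int partition)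

-- ===== LEMMAS AND PROOFS =====
def dig (p : Int) (m : Nat) : Int := PySem.Int.mod (PySem.Int.floordiv p ((5 : Int) ^ m)) 5
def SF (p : Int) (k : Nat) (x : Nat) : List Int :=
  (PySem.List.pyRange 1 (1 + (k : Int)) 1).filter (fun n => dig p n.toNat == (x : Int))
def WF (p : Int) (k : Nat) (m : Nat) : Option Int :=
  if 1 ≤ m ∧ m ≤ k then some (dig p m) else none
def Sfun (p : Int) (k : Nat) : List (List Int) := (List.range 5).map (SF p k)
def Wfun (p : Int) (k : Nat) : List (Option Int) := (List.range 161).map (WF p k)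
def Mfun (p : Int) (k : Nat) : List (List Int) := (List.range 5).map (fun x => (SF p k x).take 2)
lemma floordiv_pow_succ (p : Int) (k : Nat) :
    PySem.Int.floordiv (PySem.Int.floordiv p ((5 : Int) ^ k)) 5 = PySem.Int.floordiv p ((5 : Int) ^ (k + 1)) := by
  rw [PySem.Int.floordiv_eq_ediv_of_pos (b := 5) (by norm_num),
      PySem.Int.floordiv_eq_ediv_of_pos (by positivity),
      PySem.Int.floordiv_eq_ediv_of_pos (by positivity),
      Int.ediv_ediv_of_nonneg (by positivity), pow_succ]
lemma getD_map_range' {α : Type} (m j : Nat) (hj : j < m) (f : Nat → α) (d : α) :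
    ((List.range m).map f).getD j d = f j := by
  simp [List.getD_eq_getElem?_getD, hj]
lemma set_map_range {α : Type} (m j : Nat) (f : Nat → α) (v : α) :
    ((List.range m).map f).set j v = (List.range m).map (fun x => if x = j then v else f x) := by
  apply List.ext_getElem (by simp)
  intro i h1 h2
  simp only [List.getElem_set, List.getElem_map, List.getElem_range]
  split_ifs with h h' h' <;> first | rfl | omega
lemma take2_append {α : Type} (l : List α) (a : α) :
    List.take 2 (l ++ [a]) = if l.length < 2 then l ++ [a] else List.take 2 l := by
  match l with
  | [] => rfl
  | [x] => rfl
  | x :: y :: t => simp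

set_option maxRecDepth 8192 in
lemma loopA_inv (p : Int) (k : Nat) (hk : k ≤ 160) :
    (PySem.List.pyRange 1 (1 + (k : Int)) 1).foldl stepA
      (List.replicate 5 [], List.replicate 161 none, List.replicate 5 [], p)
    = (Sfun p k, Wfun p k, Mfun p k, PySem.Int.floordiv p ((5 : Int) ^ k)) := by
  induction k with
  | zero =>
      have hS : Sfun p 0 = List.replicate 5 [] := by
        unfold Sfun SF
        simp only [Nat.cast_zero, add_zero, PySem.List.pyRange_one_eq_nil le_rfl]
        simp
      have hM : Mfun p 0 = List.replicate 5 [] := by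
        unfold Mfun SF
        simp only [Nat.cast_zero, add_zero, PySem.List.pyRange_one_eq_nil le_rfl]
        simp
      have hW : Wfun p 0 = List.replicate 161 none := by
        unfold Wfun
        rw [show WF p 0 = (fun _ : Nat => (none : Option Int)) from funext (fun m => by
          unfold WF; rw [if_neg]; omega)]
        simp
      have hdiv : PySem.Int.floordiv p ((5:Int)^0) = p := by
        rw [pow_zero, PySem.Int.floordiv_eq_ediv_of_pos (by norm_num), Int.ediv_one]
      rw [PySem.List.pyRange_one_eq_nil (by norm_num), List.foldl_nil, hS, hW, hM, hdiv]
  | succ k ih =>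
      have hcast : (1 : Int) + ((k+1 : Nat) : Int) = (1 + (k : Int)) + 1 := by push_cast; ring
      have hsplit : PySem.List.pyRange 1 (1 + ((k+1 : Nat) : Int)) 1
          = PySem.List.pyRange 1 (1 + (k : Int)) 1 ++ [1 + (k : Int)] := by
        rw [hcast, PySem.List.pyRange_one_succ_right (by omega)]
      rw [hsplit, List.foldl_append, ih (by omega)]
      set i := dig p (k+1) with hi
      have hipos : 0 ≤ i := PySem.Int.mod_nonneg _ (by norm_num)
      have hilt : i < 5 := PySem.Int.mod_lt _ (by norm_num)
      set j := i.toNat with hj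
      have hji : (j : Int) = i := by omega
      have hjlt : j < 5 := by omega
      have htn : ((1 : Int) + (k : Int)).toNat = k + 1 := by omega
      have hfilter : ∀ x : Nat,
          SF p (k+1) x = SF p k x ++ (if x = j then [1 + (k : Int)] else []) := by
        intro x
        unfold SF
        rw [hsplit, List.filter_append]
        congr 1
        simp only [List.filter_cons, List.filter_nil, htn, ← hi]
        by_cases hx : x = j
        · rw [if_pos hx]; subst hx; simp [← hji]
        · have hne : ¬ i = (x : Int) := by omega
          rw [if_neg hx]; simp [hne]
      simp only [List.foldl_cons, List.foldl_nil, stepA, floordiv_pow_succ]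
      refine Prod.ext ?_ (Prod.ext ?_ (Prod.ext ?_ rfl))
      · -- subsets
        show PySem.List.pySetD (Sfun p k) i
            (PySem.List.pyGetD (Sfun p k) i [] ++ [1 + (k:Int)]) = Sfun p (k+1)
        rw [← hji]
        simp only [PySem.List.pySetD_natCast, PySem.List.pyGetD_natCast]
        unfold Sfun
        rw [getD_map_range' 5 j hjlt, set_map_range]
        apply List.map_congr_left
        intro x hx
        rw [hfilter x]
        by_cases hxj : x = j
        · subst hxj; simp
        · simp [hxj]
      · -- word
        show PySem.List.pySetD (Wfun p k) (1 + (k:Int)) (some i) = Wfun p (k+1)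
        have hcast2 : (1 : Int) + (k : Int) = ((k+1 : Nat) : Int) := by push_cast; ring
        rw [hcast2]
        simp only [PySem.List.pySetD_natCast]
        unfold Wfun
        rw [set_map_range]
        apply List.map_congr_left
        intro m hm
        unfold WF
        by_cases hmk : m = k + 1
        · subst hmk; rw [if_pos rfl, if_pos (by omega), hi]
        · rw [if_neg hmk]
          by_cases h1 : 1 ≤ m ∧ m ≤ k
          · rw [if_pos h1, if_pos (by omega)]
          · rw [if_neg h1, if_neg (by omega)]
      · -- mins
        show (if (PySem.List.pyGetD (Mfun p k) i []).length < 2 then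
              PySem.List.pySetD (Mfun p k) i (PySem.List.pyGetD (Mfun p k) i [] ++ [1 + (k:Int)])
            else Mfun p k) = Mfun p (k+1)
        rw [← hji]
        simp only [PySem.List.pySetD_natCast, PySem.List.pyGetD_natCast]
        unfold Mfun
        rw [getD_map_range' 5 j hjlt]
        have hlen : ((SF p k j).take 2).length < 2 ↔ (SF p k j).length < 2 := by
          simp [List.length_take]
        by_cases hc : (SF p k j).length < 2
        · rw [if_pos (hlen.mpr hc), set_map_range]
          apply List.map_congr_left
          intro x hx
          rw [hfilter x]
          by_cases hxj : x = j
          · subst hxj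
            simp only [if_true]
            rw [take2_append, if_pos hc, List.take_of_length_le (by omega)]
          · simp only [if_neg hxj, List.append_nil]
        · rw [if_neg (by rw [hlen]; exact hc)]
          apply List.map_congr_left
          intro x hx
          rw [hfilter x]
          by_cases hxj : x = j
          · subst hxj
            simp only [if_true]
            rw [take2_append, if_neg hc]
          · simp only [if_neg hxj, List.append_nil]

lemma enumerate_map_pyRange (g : Int → Int) (b : Nat) :
    PySem.List.enumerate ((PySem.List.pyRange 1 (1 + (b : Int)) 1).map g) 1
    = (PySem.List.pyRange 1 (1 + (b : Int)) 1).map (fun n => (n, g n)) := by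
  induction b with
  | zero => simp [PySem.List.pyRange_one_eq_nil le_rfl, PySem.List.enumerate_nil]
  | succ b ih =>
      have hcast : (1 : Int) + ((b+1 : Nat) : Int) = (1 + (b : Int)) + 1 := by push_cast; ring
      rw [hcast, PySem.List.pyRange_one_succ_right (by omega), List.map_append,
        PySem.List.enumerate_append, ih, List.map_append]
      congr 1
      simp [PySem.List.enumerate_cons, PySem.List.enumerate_nil, PySem.List.length_pyRange_one]

set_option maxRecDepth 8192 in
lemma altB (p : Int) : from_int_alt p = (Sfun p 160, Wfun p 160, Mfun p 160) := by
  unfold from_int_alt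
  have hg : (fun n : Int => PySem.Int.mod (PySem.Int.floordiv p ((5 : Int) ^ n.toNat)) 5)
      = (fun n : Int => dig p n.toNat) := rfl
  have h161 : (161 : Int) = 1 + ((160 : Nat) : Int) := by norm_num
  have hsub : (PySem.List.pyRange 0 5 1).map
      (fun i => ((PySem.List.enumerate ((PySem.List.pyRange 1 161 1).map
        (fun n => PySem.Int.mod (PySem.Int.floordiv p ((5 : Int) ^ n.toNat)) 5)) 1).filter
        (fun q => q.2 == i)).map (·.1)) = Sfun p 160 := by
    rw [hg, h161, enumerate_map_pyRange]
    have hfil : ∀ i : Int, (((PySem.List.pyRange 1 (1 + ((160:Nat) : Int)) 1).map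
        (fun n => (n, dig p n.toNat))).filter (fun q => q.2 == i)).map (·.1)
        = (PySem.List.pyRange 1 (1 + ((160:Nat) : Int)) 1).filter (fun n => dig p n.toNat == i) := by
      intro i
      rw [List.filter_map, List.map_map]
      simp [Function.comp_def]
    simp only [hfil]
    rw [show PySem.List.pyRange 0 5 1 = [0, 1, 2, 3, 4] from by decide]
    unfold Sfun SF
    rw [show List.range 5 = [0, 1, 2, 3, 4] from rfl]
    simp only [List.map_cons, List.map_nil]
    norm_num
  refine Prod.ext ?_ (Prod.ext ?_ ?_)
  · exact hsub
  · -- word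
    show (none :: ((PySem.List.pyRange 1 161 1).map
      (fun n => PySem.Int.mod (PySem.Int.floordiv p ((5 : Int) ^ n.toNat)) 5)).map some) = Wfun p 160
    rw [hg, h161]
    apply List.ext_getElem
    · simp [PySem.List.length_pyRange_one, Wfun]
    · intro m h1 h2
      match m with
      | 0 => simp [Wfun, WF]
      | (m+1) =>
          have hm : m < 160 := by
            simp [PySem.List.length_pyRange_one] at h1; omega
          simp only [List.getElem_cons_succ, List.getElem_map, Wfun, List.getElem_range,
            PySem.List.getElem_pyRange_one, WF]
          rw [if_pos (by omega)]
          congr 1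
          congr 1
          omega
  · -- mins
    show ((PySem.List.pyRange 0 5 1).map
      (fun i => ((PySem.List.enumerate ((PySem.List.pyRange 1 161 1).map
        (fun n => PySem.Int.mod (PySem.Int.floordiv p ((5 : Int) ^ n.toNat)) 5)) 1).filter
        (fun q => q.2 == i)).map (·.1))).map (fun s => PySem.List.slice s none (some 2)) = Mfun p 160
    rw [hsub]
    unfold Sfun Mfun
    rw [List.map_map]
    apply List.map_congr_left
    intro x hx
    simp only [Function.comp_def]
    rw [show (2 : Int) = ((2 : Nat) : Int) from rfl, PySem.List.slice_to_natCast]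


-- ===== VERDICT (by name: the statement is the Claim_ definition above) =====
theorem from_int_spec : Claim_equal_from_int := by
  intro p _
  unfold Spec_from_int
  rw [altB]
  unfold from_int
  rw [show (161 : Int) = 1 + ((160 : Nat) : Int) from by norm_num, loopA_inv p 160 le_rfl]
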